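-- pv_equiv track=rewrite | github.com/Psyche0524/FINAL-PROJECT | TESTING/Try.py | caesars_box_cipher
-- ===== SOURCE A (Python) =====
-- import math
--
-- def caesars_box_cipher(text, mode='encrypt'):
--     length = len(text)
--     side = math.ceil(math.sqrt(length))
--     grid = [['' for _ in range(side)] for _ in range(side)]
--
--     if mode == 'encrypt':
--         index = 0
--         for r in range(side):
--             for c in range(side):
--                 if index < length:
--                     grid[r][c] = text[index]
--                     index += 1
--
--         result = ''
--         for c in range(side):
--             for r in range(side):
--                 if grid[r][c] != '':
--                     result += grid[r][c]
--     elif mode == 'decrypt':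
--         index = 0
--         for c in range(side):
--             for r in range(side):
--                 if index < length:
--                     grid[r][c] = text[index]
--                     index += 1
--
--         result = ''
--         for r in range(side):
--             for c in range(side):
--                 if grid[r][c] != '':
--                     result += grid[r][c]
--
--     return result
-- ===== SOURCE B (Python) =====
-- import math
--
-- def caesars_box_cipher(text, mode='encrypt'):
--     length = len(text)
--     side = math.ceil(math.sqrt(length))
--     if mode == 'encrypt':
--         result = ''.join(text[c::side] for c in range(side))
--     elif mode == 'decrypt':
--         result = ''.join(text[r::side] for r in range(side))
--     return result
-- ===== Notes on version B (the rewrite author's own statement) =====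
-- stated objective: simpler
-- what changed: Drops the side-by-side grid and the four nested fill/read loops entirely: the column/row transposition is computed directly as a join of strided slices text[k::side], which reproduces the empty-cell skipping automatically.
import Mathlib
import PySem

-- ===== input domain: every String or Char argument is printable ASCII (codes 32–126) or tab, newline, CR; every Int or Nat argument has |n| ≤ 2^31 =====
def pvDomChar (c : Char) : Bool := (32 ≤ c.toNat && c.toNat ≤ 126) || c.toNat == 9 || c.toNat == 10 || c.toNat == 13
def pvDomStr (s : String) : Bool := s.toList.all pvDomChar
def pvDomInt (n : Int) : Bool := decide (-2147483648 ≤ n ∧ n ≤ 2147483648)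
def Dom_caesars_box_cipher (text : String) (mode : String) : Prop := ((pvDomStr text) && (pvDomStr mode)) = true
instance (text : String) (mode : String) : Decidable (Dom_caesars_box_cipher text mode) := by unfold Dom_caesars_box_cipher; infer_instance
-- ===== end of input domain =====

-- B drops A's side×side grid and its four nested fill/read loops: the Caesar's-box
-- transposition is computed directly as a join of strided slices text[k::side] (simpler).

-- ===== PORT A =====

-- port of math.ceil(math.sqrt(n)): exact for the string lengths admitted here
def pyCeilSqrt (n : Nat) : Nat :=
  if Nat.sqrt n * Nat.sqrt n = n then Nat.sqrt n else Nat.sqrt n + 1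

-- grid[r][c] = v  (cells are Option Char: none is the '' placeholder)
def gridSet (g : List (List (Option Char))) (r c : Nat) (v : Option Char) :
    List (List (Option Char)) :=
  g.modify r (fun row => row.set c v)

def caesars_box_cipher (text : String) (mode : String) : String :=
  let cs := text.toList
  let length := cs.length
  let side := pyCeilSqrt length
  let grid0 : List (List (Option Char)) := List.replicate side (List.replicate side none)
  if mode == "encrypt" then
    -- fill row-major; grid[r][c] = text[index] (index < length, so cs[index]? is some)
    let fill := (List.range side).foldl (fun st r =>
      (List.range side).foldl (fun (st : List (List (Option Char)) × Nat) c =>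
        if st.2 < length then (gridSet st.1 r c cs[st.2]?, st.2 + 1) else st) st)
      (grid0, 0)
    -- read column-major, skipping empty cells
    let res := (List.range side).foldl (fun acc c =>
      (List.range side).foldl (fun acc r =>
        match (fill.1.getD r []).getD c none with
        | some ch => acc ++ [ch]
        | none => acc) acc) ([] : List Char)
    String.mk res
  else if mode == "decrypt" then
    -- fill column-major
    let fill := (List.range side).foldl (fun st c =>
      (List.range side).foldl (fun (st : List (List (Option Char)) × Nat) r =>
        if st.2 < length then (gridSet st.1 r c cs[st.2]?, st.2 + 1) else st) st)
      (grid0, 0)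
    -- read row-major, skipping empty cells
    let res := (List.range side).foldl (fun acc r =>
      (List.range side).foldl (fun acc c =>
        match (fill.1.getD r []).getD c none with
        | some ch => acc ++ [ch]
        | none => acc) acc) ([] : List Char)
    String.mk res
  else "" -- Python raises UnboundLocalError here; excluded by Pre_caesars_box_cipher

-- ===== PORT B =====
def caesars_box_cipher_alt (text : String) (mode : String) : String :=
  let cs := text.toList
  let side := pyCeilSqrt cs.length
  if mode == "encrypt" then
    -- ''.join(text[c::side] for c in range(side)); side > 0 whenever a slice is taken
    String.mk ((List.range side).flatMap (fun (c : Nat) =>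
      (PySem.List.slice? cs (some (c : Int)) none (side : Int)).getD []))
  else if mode == "decrypt" then
    -- ''.join(text[r::side] for r in range(side))
    String.mk ((List.range side).flatMap (fun (r : Nat) =>
      (PySem.List.slice? cs (some (r : Int)) none (side : Int)).getD []))
  else "" -- Python raises UnboundLocalError here; excluded by Pre_caesars_box_cipher

-- ===== PRECONDITION & SPEC =====
-- On any other mode A (and B) end with UnboundLocalError ('result' never assigned): excluded.
def Pre_caesars_box_cipher (text : String) (mode : String) : Prop :=
  mode = "encrypt" ∨ mode = "decrypt"
instance (text : String) (mode : String) : Decidable (Pre_caesars_box_cipher text mode) := by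
  unfold Pre_caesars_box_cipher; infer_instance

def pvWitness_caesars_box_cipher : String × String := ("HELLO WORLD", "encrypt")

def Spec_caesars_box_cipher (text : String) (mode : String) (out : String) : Prop := out = caesars_box_cipher_alt text mode
instance (text : String) (mode : String) (out : String) : Decidable (Spec_caesars_box_cipher text mode out) := by unfold Spec_caesars_box_cipher; infer_instance

-- ===== CLAIM (what is proved, stated in full; the proofs are below) =====
def Claim_equal_caesars_box_cipher : Prop := ∀ (text : String) (mode : String), Dom_caesars_box_cipher text mode → Pre_caesars_box_cipher text mode → Spec_caesars_box_cipher text mode (caesars_box_cipher text mode)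

-- ===== LEMMAS AND PROOFS =====

-- the grid after the first min m n cells (in the order pos) have been written
def gridAt (cs : List Char) (s : Nat) (pos : Nat → Nat → Nat) (m : Nat) :
    List (List (Option Char)) :=
  (List.range s).map (fun r => (List.range s).map (fun c =>
    if pos r c < min m cs.length then cs[pos r c]? else none))

theorem n_le_sq (n : Nat) : n ≤ pyCeilSqrt n * pyCeilSqrt n := by
  unfold pyCeilSqrt
  split_ifs with h
  · omega
  · have := Nat.lt_succ_sqrt n
    simpa [Nat.succ_mul, Nat.mul_succ] using this.le

theorem side_le (n : Nat) (h : 1 ≤ n) : pyCeilSqrt n ≤ n := by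
  unfold pyCeilSqrt
  rcases Nat.lt_or_ge n 2 with h2 | h2
  · interval_cases n <;> decide
  · have := Nat.sqrt_lt_self h2
    split_ifs <;> omega

theorem pos_inj {s a b a' b' : Nat} (hb : b < s) (hb' : b' < s)
    (h : a' * s + b' = a * s + b) : a' = a ∧ b' = b := by
  have hs : 0 < s := by omega
  have e1 : (a' * s + b') / s = a' := by
    rw [Nat.mul_comm a' s, Nat.mul_add_div hs, Nat.div_eq_of_lt hb']; omega
  have e2 : (a * s + b) / s = a := by
    rw [Nat.mul_comm a s, Nat.mul_add_div hs, Nat.div_eq_of_lt hb]; omega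
  have : a' = a := by rw [← e1, ← e2, h]
  constructor
  · exact this
  · subst this; omega

theorem set_map_range {β : Type} (f : Nat → β) (s c : Nat) (v : β) :
    ((List.range s).map f).set c v =
    (List.range s).map (fun j => if j = c then v else f j) := by
  apply List.ext_getElem?
  intro j
  by_cases hj : j < s <;>
    simp [List.getElem?_set, List.getElem?_map, List.getElem?_range, hj, eq_comm]
  · split_ifs <;> simp_all

theorem modify_map_range {β : Type} (f : Nat → β) (s r : Nat) (g : β → β) :
    ((List.range s).map f).modify r g =
    (List.range s).map (fun j => if j = r then g (f j) else f j) := by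
  apply List.ext_getElem?
  intro j
  by_cases hj : j < s <;>
    simp [List.getElem?_modify, List.getElem?_map, List.getElem?_range, hj, eq_comm]
  · split_ifs <;> simp_all

theorem gridAt_zero (cs : List Char) (s : Nat) (pos : Nat → Nat → Nat) :
    gridAt cs s pos 0 = List.replicate s (List.replicate s none) := by
  simp [gridAt, List.map_const']

theorem gridAt_stall (cs : List Char) (s : Nat) (pos : Nat → Nat → Nat) (m : Nat)
    (h : cs.length ≤ m) : gridAt cs s pos (m + 1) = gridAt cs s pos m := by
  unfold gridAt
  have : min (m + 1) cs.length = min m cs.length := by omega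
  rw [this]

theorem gridSet_gridAt (cs : List Char) (s : Nat) (pos : Nat → Nat → Nat)
    {m r c : Nat} (hr : r < s) (hc : c < s) (hm : m < cs.length) (hp : pos r c = m)
    (hinj : ∀ r' c', r' < s → c' < s → pos r' c' = m → r' = r ∧ c' = c) :
    gridSet (gridAt cs s pos m) r c cs[m]? = gridAt cs s pos (m + 1) := by
  unfold gridSet gridAt
  rw [modify_map_range]
  apply List.map_congr_left
  intro j hj
  rw [List.mem_range] at hj
  by_cases hjr : j = r
  · subst hjr
    simp only [if_pos rfl]
    rw [set_map_range]
    apply List.map_congr_left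
    intro k hk
    rw [List.mem_range] at hk
    by_cases hkc : k = c
    · subst hkc
      simp [hp, hm]
    · rw [if_neg hkc]
      have hne : pos j k ≠ m := fun h => hkc (hinj j k hj hk h).2
      have : pos j k < min (m + 1) cs.length ↔ pos j k < min m cs.length := by omega
      simp [this]
  · rw [if_neg hjr]
    apply List.map_congr_left
    intro k hk
    rw [List.mem_range] at hk
    have hne : pos j k ≠ m := fun h => hjr (hinj j k hj hk h).1
    have : pos j k < min (m + 1) cs.length ↔ pos j k < min m cs.length := by omega
    simp [this]

theorem fillE_inner (cs : List Char) (s r : Nat) (hr : r < s) (k : Nat) (hk : k ≤ s) :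
    (List.range k).foldl (fun (st : List (List (Option Char)) × Nat) c =>
        if st.2 < cs.length then (gridSet st.1 r c cs[st.2]?, st.2 + 1) else st)
      (gridAt cs s (fun a b => a * s + b) (r * s), min (r * s) cs.length)
    = (gridAt cs s (fun a b => a * s + b) (r * s + k), min (r * s + k) cs.length) := by
  induction k with
  | zero => simp
  | succ k ih =>
    have hk' : k ≤ s := by omega
    have eadd : r * s + (k + 1) = (r * s + k) + 1 := by omega
    rw [eadd, List.range_succ, List.foldl_append, ih hk', List.foldl_cons, List.foldl_nil]
    by_cases hm : r * s + k < cs.length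
    · rw [if_pos (by change min (r * s + k) cs.length < cs.length; omega)]
      have hmin : min (r * s + k) cs.length = r * s + k := by omega
      rw [hmin]
      rw [gridSet_gridAt cs s _ hr (by omega) hm rfl
        (fun r' c' hr' hc' h => pos_inj (show k < s by omega) hc' h)]
      have : min ((r * s + k) + 1) cs.length = (r * s + k) + 1 := by omega
      rw [this]
    · rw [if_neg (by change ¬ min (r * s + k) cs.length < cs.length; omega)]
      rw [gridAt_stall cs s _ _ (by omega)]
      have : min ((r * s + k) + 1) cs.length = min (r * s + k) cs.length := by omega
      rw [this]

theorem fillE_outer (cs : List Char) (s : Nat) (k : Nat) (hk : k ≤ s) :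
    (List.range k).foldl (fun st r =>
        (List.range s).foldl (fun (st : List (List (Option Char)) × Nat) c =>
          if st.2 < cs.length then (gridSet st.1 r c cs[st.2]?, st.2 + 1) else st) st)
      (List.replicate s (List.replicate s none), 0)
    = (gridAt cs s (fun a b => a * s + b) (k * s), min (k * s) cs.length) := by
  induction k with
  | zero => simp [gridAt_zero]
  | succ k ih =>
    have hk' : k ≤ s := by omega
    rw [List.range_succ, List.foldl_append, ih hk', List.foldl_cons, List.foldl_nil]
    rw [fillE_inner cs s k (by omega) s le_rfl]
    have : k * s + s = (k + 1) * s := by ring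
    rw [this]

theorem fillD_inner (cs : List Char) (s c : Nat) (hc : c < s) (k : Nat) (hk : k ≤ s) :
    (List.range k).foldl (fun (st : List (List (Option Char)) × Nat) r =>
        if st.2 < cs.length then (gridSet st.1 r c cs[st.2]?, st.2 + 1) else st)
      (gridAt cs s (fun a b => b * s + a) (c * s), min (c * s) cs.length)
    = (gridAt cs s (fun a b => b * s + a) (c * s + k), min (c * s + k) cs.length) := by
  induction k with
  | zero => simp
  | succ k ih =>
    have hk' : k ≤ s := by omega
    have eadd : c * s + (k + 1) = (c * s + k) + 1 := by omega
    rw [eadd, List.range_succ, List.foldl_append, ih hk', List.foldl_cons, List.foldl_nil]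
    by_cases hm : c * s + k < cs.length
    · rw [if_pos (by change min (c * s + k) cs.length < cs.length; omega)]
      have hmin : min (c * s + k) cs.length = c * s + k := by omega
      rw [hmin]
      rw [gridSet_gridAt cs s _ (show k < s by omega) hc hm rfl
        (fun r' c' hr' hc' h => by
          have := pos_inj (show k < s by omega) hr' h
          exact ⟨this.2, this.1⟩)]
      have : min ((c * s + k) + 1) cs.length = (c * s + k) + 1 := by omega
      rw [this]
    · rw [if_neg (by change ¬ min (c * s + k) cs.length < cs.length; omega)]
      rw [gridAt_stall cs s _ _ (by omega)]
      have : min ((c * s + k) + 1) cs.length = min (c * s + k) cs.length := by omega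
      rw [this]

theorem fillD_outer (cs : List Char) (s : Nat) (k : Nat) (hk : k ≤ s) :
    (List.range k).foldl (fun st c =>
        (List.range s).foldl (fun (st : List (List (Option Char)) × Nat) r =>
          if st.2 < cs.length then (gridSet st.1 r c cs[st.2]?, st.2 + 1) else st) st)
      (List.replicate s (List.replicate s none), 0)
    = (gridAt cs s (fun a b => b * s + a) (k * s), min (k * s) cs.length) := by
  induction k with
  | zero => simp [gridAt_zero]
  | succ k ih =>
    have hk' : k ≤ s := by omega
    rw [List.range_succ, List.foldl_append, ih hk', List.foldl_cons, List.foldl_nil]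
    rw [fillD_inner cs s k (by omega) s le_rfl]
    have : k * s + s = (k + 1) * s := by ring
    rw [this]

theorem foldl_match_filterMap {α : Type} (f : α → Option Char) (l : List α) (acc : List Char) :
    l.foldl (fun a x => match f x with | some ch => a ++ [ch] | none => a) acc
    = acc ++ l.filterMap f := by
  induction l generalizing acc with
  | nil => simp
  | cons hd tl ih => cases hfx : f hd <;> simp [hfx, ih]

theorem read_eq (s : Nat) (h : Nat → Nat → Option Char) :
    (List.range s).foldl (fun acc x => (List.range s).foldl (fun acc y =>
        match h x y with | some ch => acc ++ [ch] | none => acc) acc) ([] : List Char)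
    = (List.range s).flatMap (fun x => (List.range s).filterMap (h x)) := by
  have hfun : (fun (acc : List Char) x => (List.range s).foldl (fun acc y =>
      match h x y with | some ch => acc ++ [ch] | none => acc) acc)
      = fun acc x => acc ++ (List.range s).filterMap (h x) := by
    funext acc x; exact foldl_match_filterMap _ _ _
  rw [hfun, PySem.List.foldl_append_eq_flatMap]
  simp

theorem gridAt_cell (cs : List Char) (s : Nat) (pos : Nat → Nat → Nat) (m r c : Nat)
    (hr : r < s) (hc : c < s) :
    ((gridAt cs s pos m).getD r []).getD c none
    = if pos r c < min m cs.length then cs[pos r c]? else none := by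
  unfold gridAt
  rw [PySem.List.getD_map_range _ _ _ _ hr, PySem.List.getD_map_range _ _ _ _ hc]

theorem filterMap_range_if {β : Type} (g : Nat → Option β) (N s : Nat) (h : N ≤ s) :
    (List.range s).filterMap (fun r => if r < N then g r else none)
    = (List.range N).filterMap g := by
  rw [show s = N + (s - N) by omega, List.range_add, List.filterMap_append]
  have h1 : (List.range N).filterMap (fun r => if r < N then g r else none)
      = (List.range N).filterMap g := by
    apply List.filterMap_congr
    intro r hr
    rw [List.mem_range] at hr
    rw [if_pos hr]
  have h2 : ((List.range (s - N)).map (fun x => N + x)).filterMap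
      (fun r => if r < N then g r else none) = [] := by
    rw [List.filterMap_map]
    apply List.filterMap_eq_nil_iff.mpr
    intro j _
    simp [Function.comp]
  rw [h1, h2, List.append_nil]

theorem slice?_step (cs : List Char) (c s : Nat) (hs : 0 < s) (hc : c < cs.length) :
    (PySem.List.slice? cs (some (c : Int)) none (s : Int)).getD []
    = (List.range ((cs.length - c + s - 1) / s)).filterMap (fun k => cs[c + s * k]?) := by
  have h1 : ¬((s : Int) = 0) := by omega
  have h2 : ¬((s : Int) < 0) := by omega
  have h3 : ¬((c : Int) < 0) := by omega
  have h4 : min (c : Int) (cs.length : Int) = (c : Int) := by omega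
  have h5 : (c : Int) < (cs.length : Int) := by omega
  have h6 : (0 : Int) < (s : Int) := by omega
  simp only [PySem.List.slice?, PySem.List.sliceIndices, h1, h2, h3, h4, h5, h6,
    if_false, if_true, Option.getD_some]
  have hcnt : ((cs.length : Int) - ↑c + ↑s - 1) / ↑s = ((cs.length - c + s - 1) / s : Nat) := by
    rw [show ((cs.length : Int) - ↑c + ↑s - 1) = ((cs.length - c + s - 1 : Nat) : Int) by omega,
      Int.natCast_ediv]
  rw [hcnt, Int.toNat_natCast]
  apply List.filterMap_congr
  intro k _
  congr 1

theorem col_eq (cs : List Char) (s c : Nat) (hc : c < s) (hcn : c < cs.length)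
    (hsq : cs.length ≤ s * s) :
    (List.range s).filterMap (fun r => if r * s + c < cs.length then cs[r * s + c]? else none)
    = (PySem.List.slice? cs (some (c : Int)) none (s : Int)).getD [] := by
  have hs : 0 < s := by omega
  rw [slice?_step cs c s hs hcn]
  have hNiff : ∀ r, r < (cs.length - c + s - 1) / s ↔ r * s + c < cs.length := by
    intro r
    rw [Nat.lt_iff_add_one_le, Nat.le_div_iff_mul_le hs,
      show (r + 1) * s = r * s + s by ring]
    omega
  have hNs : (cs.length - c + s - 1) / s ≤ s := by
    rw [Nat.div_le_iff_le_mul_add_pred hs]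
    omega
  rw [← filterMap_range_if (fun k => cs[c + s * k]?) _ s hNs]
  apply List.filterMap_congr
  intro r hr
  by_cases h : r * s + c < cs.length
  · rw [if_pos h, if_pos ((hNiff r).mpr h), show c + s * r = r * s + c by ring]
  · rw [if_neg h, if_neg (fun hh => h ((hNiff r).mp hh))]

-- ===== VERDICT (by name: the statement is the Claim_ definition above) =====
theorem caesars_box_cipher_spec : Claim_equal_caesars_box_cipher := by
  unfold Claim_equal_caesars_box_cipher
  intro text mode _ hpre
  unfold Spec_caesars_box_cipher caesars_box_cipher caesars_box_cipher_alt
  rcases hpre with h | h <;> subst h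
  · dsimp only
    simp only [beq_self_eq_true, if_true]
    generalize text.toList = cs
    set s := pyCeilSqrt cs.length with hs
    rw [fillE_outer cs s s le_rfl]
    rw [read_eq s (fun x y => (((gridAt cs s (fun a b => a * s + b) (s * s),
      min (s * s) cs.length)).1.getD y []).getD x none)]
    congr 1
    apply List.flatMap_congr
    intro c hc
    rw [List.mem_range] at hc
    have hs0 : 0 < s := by omega
    have hn1 : 1 ≤ cs.length := by
      by_contra hn
      have hz : cs.length = 0 := by omega
      rw [hz] at hs
      rw [show pyCeilSqrt 0 = 0 from by decide] at hs
      omega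
    have hcn : c < cs.length := lt_of_lt_of_le hc (by rw [hs]; exact side_le _ hn1)
    have hsq : cs.length ≤ s * s := by rw [hs]; exact n_le_sq _
    rw [← col_eq cs s c hc hcn hsq]
    apply List.filterMap_congr
    intro r hr
    rw [List.mem_range] at hr
    dsimp only
    rw [gridAt_cell cs s _ (s * s) r c hr hc, Nat.min_eq_right hsq]
  · dsimp only
    rw [if_neg (by decide), if_pos (by decide), if_neg (by decide), if_pos (by decide)]
    generalize text.toList = cs
    set s := pyCeilSqrt cs.length with hs
    rw [fillD_outer cs s s le_rfl]
    rw [read_eq s (fun x y => (((gridAt cs s (fun a b => b * s + a) (s * s),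
      min (s * s) cs.length)).1.getD x []).getD y none)]
    congr 1
    apply List.flatMap_congr
    intro r hr
    rw [List.mem_range] at hr
    have hs0 : 0 < s := by omega
    have hn1 : 1 ≤ cs.length := by
      by_contra hn
      have hz : cs.length = 0 := by omega
      rw [hz] at hs
      rw [show pyCeilSqrt 0 = 0 from by decide] at hs
      omega
    have hrn : r < cs.length := lt_of_lt_of_le hr (by rw [hs]; exact side_le _ hn1)
    have hsq : cs.length ≤ s * s := by rw [hs]; exact n_le_sq _
    rw [← col_eq cs s r hr hrn hsq]
    apply List.filterMap_congr
    intro c hc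
    rw [List.mem_range] at hc
    dsimp only
    rw [gridAt_cell cs s _ (s * s) r c hr hc, Nat.min_eq_right hsq]
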